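-- pv_equiv track=rewrite | github.com/taehooK/CodingTestPracticeBook | Code/Chapter13/감시 피하기(20).py | solution
-- ===== SOURCE A (Python) =====
-- from collections import deque
-- from itertools import combinations
--
-- rowOffset = [-1, 1, 0 ,0]
--
-- columnOffset = [0, 0, -1, 1]
--
-- def check(area, teachers_position):
--     for position in teachers_position:
--         for i in range(4):
--             row = position[0] + rowOffset[i]
--             column = position[1] + columnOffset[i]
--             while 0 <= row < len(area) and 0 <= column < len(area):
--                 if area[row][column] == 'O':
--                     break
--                 elif area[row][column] == 'S':
--                     return False
--                 row += rowOffset[i]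
--                 column += columnOffset[i]
--     return True
--
-- def get_value_position(area, value):
--     queue = deque()
--     for i in range(len(area)):
--         for j in range(len(area)):
--             if area[i][j] == value:
--                 queue.append((i, j))
--     return queue
--
-- def solution(area):
--     teacher_position = list(get_value_position(area, 'T'))
--     blank_position = get_value_position(area, 'X')
--     blank_position = combinations(blank_position, 3)
--
--     for positions in blank_position:
--         for position in positions:
--             area[position[0]][position[1]] = 'O'
--         if check(area, teacher_position):
--             return True
--         for position in positions:
--             area[position[0]][position[1]] = 'X'
--
--     return False
-- ===== SOURCE B (Python) =====
-- from itertools import combinations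
--
-- _DIRS = ((-1, 0), (1, 0), (0, -1), (0, 1))
--
-- def _segments(area):
--     # one teacher->student sightline = list of blank 'X' cells between them (stop at 'O'/boundary)
--     n = len(area)
--     segs = []
--     for i in range(n):
--         for j in range(n):
--             if area[i][j] == 'T':
--                 for dr, dc in _DIRS:
--                     r, c, blanks = i + dr, j + dc, []
--                     while 0 <= r < n and 0 <= c < n:
--                         v = area[r][c]
--                         if v == 'O':
--                             break
--                         if v == 'S':
--                             segs.append(blanks)
--                             break
--                         if v == 'X':
--                             blanks.append((r, c))
--                         r += dr
--                         c += dc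
--     return segs
--
-- def solution(area):
--     n = len(area)
--     segs = _segments(area)
--     blanks = [(i, j) for i in range(n) for j in range(n) if area[i][j] == 'X']
--     for triple in combinations(blanks, 3):
--         chosen = set(triple)
--         if all(any(cell in chosen for cell in seg) for seg in segs):
--             return True
--     return False
-- ===== Notes on version B (the rewrite author's own statement) =====
-- stated objective: alternative
-- what changed: B replaces A's mutate-grid-then-rescan-all-sightlines search by precomputing each teacher's sightline segments (the blank cells between teacher and student) once and testing each wall triple by set coverage of those segments, with no grid mutation.
import Mathlib
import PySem

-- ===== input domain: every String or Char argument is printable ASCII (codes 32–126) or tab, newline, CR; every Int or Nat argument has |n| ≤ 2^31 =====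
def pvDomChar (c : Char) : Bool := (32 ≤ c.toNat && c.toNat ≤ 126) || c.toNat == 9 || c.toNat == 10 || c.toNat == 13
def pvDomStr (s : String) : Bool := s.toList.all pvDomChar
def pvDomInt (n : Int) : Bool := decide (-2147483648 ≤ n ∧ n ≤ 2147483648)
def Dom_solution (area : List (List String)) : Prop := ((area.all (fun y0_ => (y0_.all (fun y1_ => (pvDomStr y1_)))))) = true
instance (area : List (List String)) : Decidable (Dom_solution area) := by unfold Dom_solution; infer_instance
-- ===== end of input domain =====

-- B replaces A's mutate-grid-and-rescan search by precomputed sightline segments plus a set-coverage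
-- test per wall triple (alternative decomposition; return-value equivalence only: A leaves its 3 walls
-- written into `area` when it returns True, B never mutates `area`).

-- ===== PORT A =====
-- area[r][c]; both programs only read in-bounds cells (loop guards + Pre_), where getD is exact
def cellG (area : List (List String)) (r c : Int) : String :=
  PySem.List.pyGetD (PySem.List.pyGetD area r []) c ""

def rowOffset : List Int := [-1, 1, 0, 0]

def columnOffset : List Int := [0, 0, -1, 1]

-- the while-loop of A's check for one teacher and one direction;
-- fuel len(area)+1 covers its ≤ len(area) in-bounds iterations
def walkA (area : List (List String)) (dr dc : Int) : Nat → Int → Int → Bool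
  | 0, _, _ => true
  | f + 1, r, c =>
    if 0 ≤ r ∧ r < (area.length : Int) ∧ 0 ≤ c ∧ c < (area.length : Int) then
      if cellG area r c = "O" then true
      else if cellG area r c = "S" then false
      else walkA area dr dc f (r + dr) (c + dc)
    else true

def checkA (area : List (List String)) (teachers : List (Int × Int)) : Bool :=
  teachers.all fun p =>
    (List.range 4).all fun i =>
      walkA area (rowOffset.getD i 0) (columnOffset.getD i 0) (area.length + 1)
        (p.1 + rowOffset.getD i 0) (p.2 + columnOffset.getD i 0)

def getValuePos (area : List (List String)) (v : String) : List (Int × Int) :=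
  (List.range area.length).flatMap fun (i : Nat) =>
    (List.range area.length).filterMap fun (j : Nat) =>
      if cellG area (i : Int) (j : Int) = v then some ((i : Int), (j : Int)) else none

-- itertools.combinations(xs, k), lexicographic index order (both Pythons call itertools)
def combosPy {α : Type} : Nat → List α → List (List α)
  | 0, _ => [[]]
  | _ + 1, [] => []
  | k + 1, x :: rest => ((combosPy k rest).map (fun t => x :: t)) ++ combosPy (k + 1) rest

-- area[r][c] = v (the programs only assign at nonnegative in-range indices)
def setCell (a : List (List String)) (r c : Int) (v : String) : List (List String) :=
  a.modify r.toNat (fun row => row.set c.toNat v)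

-- A's main loop: place the 3 walls, check, restore (the threaded list models A's in-place mutation)
def loopA (teachers : List (Int × Int)) : List (List (Int × Int)) → List (List String) → Bool
  | [], _ => false
  | ps :: rest, a =>
    let a' := ps.foldl (fun acc q => setCell acc q.1 q.2 "O") a
    if checkA a' teachers then true
    else loopA teachers rest (ps.foldl (fun acc q => setCell acc q.1 q.2 "X") a')

def solution (area : List (List String)) : Bool :=
  loopA (getValuePos area "T") (combosPy 3 (getValuePos area "X")) area

-- ===== PORT B =====
def dirsB : List (Int × Int) := [(-1, 0), (1, 0), (0, -1), (0, 1)]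

-- B's ray walk on the unmutated grid: collect the 'X' cells up to the first 'S'
-- (none if 'O' or the boundary comes first); same fuel bound as walkA
def segRay (area : List (List String)) (n : Nat) (dr dc : Int) :
    Nat → Int → Int → List (Int × Int) → Option (List (Int × Int))
  | 0, _, _, _ => none
  | f + 1, r, c, acc =>
    if 0 ≤ r ∧ r < (n : Int) ∧ 0 ≤ c ∧ c < (n : Int) then
      if cellG area r c = "O" then none
      else if cellG area r c = "S" then some acc
      else segRay area n dr dc f (r + dr) (c + dc)
        (if cellG area r c = "X" then acc ++ [(r, c)] else acc)
    else none

def segmentsB (area : List (List String)) : List (List (Int × Int)) :=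
  (List.range area.length).flatMap fun (i : Nat) =>
    (List.range area.length).flatMap fun (j : Nat) =>
      if cellG area (i : Int) (j : Int) = "T" then
        dirsB.filterMap fun d =>
          segRay area area.length d.1 d.2 (area.length + 1) ((i : Int) + d.1) ((j : Int) + d.2) []
      else []

def solution_alt (area : List (List String)) : Bool :=
  let segs := segmentsB area
  let blanks := (List.range area.length).flatMap fun (i : Nat) =>
    (List.range area.length).filterMap fun (j : Nat) =>
      if cellG area (i : Int) (j : Int) = "X" then some ((i : Int), (j : Int)) else none
  (combosPy 3 blanks).any fun t =>
    let chosen := PySem.Set.ofList t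
    segs.all fun seg => seg.any fun q => PySem.Set.contains chosen q

-- ===== PRECONDITION & SPEC =====
-- A indexes area[i][j] for all i, j < len(area); it raises IndexError iff some row is shorter
-- than len(area). Pre_ excludes exactly those inputs (A returns on every other input).
def Pre_solution (area : List (List String)) : Prop :=
  ∀ row ∈ area, area.length ≤ row.length

instance (area : List (List String)) : Decidable (Pre_solution area) := by
  unfold Pre_solution; infer_instance

def pvWitness_solution : List (List String) :=
  [["T", "X", "X"], ["X", "X", "X"], ["X", "X", "S"]]

def Spec_solution (area : List (List String)) (out : Bool) : Prop := out = solution_alt area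
instance (area : List (List String)) (out : Bool) : Decidable (Spec_solution area out) := by
  unfold Spec_solution; infer_instance

-- ===== CLAIM (what is proved, stated in full; the proofs are below) =====
def Claim_equal_solution : Prop :=
  ∀ (area : List (List String)), Dom_solution area → Pre_solution area →
    Spec_solution area (solution area)

-- ===== LEMMAS AND PROOFS =====

-- grid cell as an Option, over Nat indices
def cell9 (a : List (List String)) (i j : Nat) : Option String := (a[i]?).bind fun row => row[j]?

-- wall v ps a = the foldl the ports run to write v at every position of ps
def wall (v : String) (ps : List (Int × Int)) (a : List (List String)) : List (List String) :=
  ps.foldl (fun acc q => setCell acc q.1 q.2 v) a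

-- positions of ps are in-range blanks of area
def GoodPos (area : List (List String)) (ps : List (Int × Int)) : Prop :=
  ∀ q ∈ ps, 0 ≤ q.1 ∧ q.1 < (area.length : Int) ∧ 0 ≤ q.2 ∧ q.2 < (area.length : Int) ∧
    cellG area q.1 q.2 = "X"

theorem length_wall (v : String) (ps : List (Int × Int)) (a : List (List String)) :
    (wall v ps a).length = a.length := by
  induction ps generalizing a with
  | nil => rfl
  | cons q ps ih => simp only [wall, List.foldl_cons] at ih ⊢; rw [ih, setCell, List.length_modify]

theorem rowlen_wall (v : String) (ps : List (Int × Int)) (a : List (List String)) (i : Nat) :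
    ((wall v ps a)[i]?).map List.length = (a[i]?).map List.length := by
  induction ps generalizing a with
  | nil => rfl
  | cons q ps ih =>
    simp only [wall, List.foldl_cons] at ih ⊢
    rw [ih, setCell, List.getElem?_modify]
    cases a[i]? <;> simp <;> split <;> simp

theorem cell9_setCell (a : List (List String)) (r c : Int) (v : String) (i j : Nat) :
    cell9 (setCell a r c v) i j =
      if r.toNat = i ∧ c.toNat = j then (cell9 a i j).map (fun _ => v) else cell9 a i j := by
  simp only [cell9, setCell, List.getElem?_modify]
  by_cases h : r.toNat = i ∧ c.toNat = j
  · obtain ⟨hr, hc⟩ := h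
    subst hr; subst hc
    simp only [and_self, if_pos trivial, if_pos rfl]
    cases ha : a[r.toNat]? with
    | none => simp
    | some row =>
      simp only [Option.map_some, Option.bind_some, List.getElem?_set, if_pos rfl]
      cases hrow : row[c.toNat]? with
      | none =>
        rw [List.getElem?_eq_none_iff] at hrow
        simp [Nat.not_lt.mpr hrow]
      | some s =>
        rw [List.getElem?_eq_some_iff] at hrow
        simp [hrow.1]
  · rw [if_neg h]
    by_cases hr : r.toNat = i
    · have hc : ¬ c.toNat = j := fun hc => h ⟨hr, hc⟩
      simp only [hr, if_pos rfl]
      cases a[i]? <;> simp [List.getElem?_set, hc]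
    · simp [hr]

theorem cell9_wall (v : String) (ps : List (Int × Int)) (a : List (List String)) (i j : Nat) :
    cell9 (wall v ps a) i j =
      if ∃ q ∈ ps, q.1.toNat = i ∧ q.2.toNat = j then (cell9 a i j).map (fun _ => v)
      else cell9 a i j := by
  induction ps generalizing a with
  | nil => simp [wall]
  | cons q ps ih =>
    simp only [wall, List.foldl_cons] at ih ⊢
    rw [ih, cell9_setCell]
    by_cases hq : q.1.toNat = i ∧ q.2.toNat = j
    · have hcons : ∃ p ∈ q :: ps, p.1.toNat = i ∧ p.2.toNat = j := ⟨q, List.mem_cons_self, hq⟩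
      rw [if_pos hcons]
      by_cases hp : ∃ p ∈ ps, p.1.toNat = i ∧ p.2.toNat = j
      · rw [if_pos hp, if_pos hq, Option.map_map]
        rfl
      · rw [if_neg hp, if_pos hq]
    · by_cases hp : ∃ p ∈ ps, p.1.toNat = i ∧ p.2.toNat = j
      · have hcons : ∃ p ∈ q :: ps, p.1.toNat = i ∧ p.2.toNat = j := by
          obtain ⟨p, hm, h⟩ := hp; exact ⟨p, List.mem_cons_of_mem _ hm, h⟩
        rw [if_pos hp, if_pos hcons, if_neg hq]
      · have hcons : ¬ ∃ p ∈ q :: ps, p.1.toNat = i ∧ p.2.toNat = j := by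
          rintro ⟨p, hmem, h⟩
          rcases List.mem_cons.mp hmem with h1 | h1
          · exact hq (h1 ▸ h)
          · exact hp ⟨p, h1, h⟩
        rw [if_neg hp, if_neg hcons, if_neg hq]

theorem cellG_cell9 (a : List (List String)) (r c : Int) (hr0 : 0 ≤ r)
    (hrn : r.toNat < a.length) (hc0 : 0 ≤ c)
    (hcl : ∀ row ∈ a, c.toNat < row.length) :
    cell9 a r.toNat c.toNat = some (cellG a r c) := by
  have hrow : a[r.toNat]? = some a[r.toNat] := List.getElem?_eq_getElem hrn
  have hmem : a[r.toNat] ∈ a := List.getElem_mem hrn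
  have hc := hcl _ hmem
  rw [cell9, hrow, Option.bind_some, cellG,
    PySem.List.pyGetD_eq_getElem a [] hr0 (by omega),
    PySem.List.pyGetD_eq_getElem _ "" hc0 (by omega)]
  exact List.getElem?_eq_getElem hc

theorem restore (area : List (List String)) (ps : List (Int × Int))
    (h : ∀ q ∈ ps, cell9 area q.1.toNat q.2.toNat = some "X") :
    wall "X" ps (wall "O" ps area) = area := by
  apply List.ext_getElem?
  intro i
  have hlen : ((wall "X" ps (wall "O" ps area))[i]?).map List.length
      = (area[i]?).map List.length := by
    rw [rowlen_wall, rowlen_wall]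
  cases ha : area[i]? with
  | none => rw [ha] at hlen; simpa using hlen
  | some row =>
    rw [ha] at hlen
    cases hb : (wall "X" ps (wall "O" ps area))[i]? with
    | none => rw [hb] at hlen; simp at hlen
    | some row2 =>
      rw [hb] at hlen
      simp only [Option.map_some, Option.some_inj] at hlen
      congr 1
      apply List.ext_getElem?
      intro j
      have hcell : cell9 (wall "X" ps (wall "O" ps area)) i j = cell9 area i j := by
        rw [cell9_wall, cell9_wall]
        by_cases hq : ∃ q ∈ ps, q.1.toNat = i ∧ q.2.toNat = j
        · rw [if_pos hq, if_pos hq]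
          obtain ⟨q, hqm, h1, h2⟩ := hq
          have := h q hqm
          rw [h1, h2] at this
          rw [this]
          rfl
        · rw [if_neg hq, if_neg hq]
      rw [cell9, cell9, ha, hb] at hcell
      simpa using hcell

theorem cellG_wall (area : List (List String)) (ps : List (Int × Int))
    (hPre : Pre_solution area) (hps : GoodPos area ps) (r c : Int)
    (hr0 : 0 ≤ r) (hrn : r < (area.length : Int)) (hc0 : 0 ≤ c) (hcn : c < (area.length : Int)) :
    cellG (wall "O" ps area) r c = if (r, c) ∈ ps then "O" else cellG area r c := by
  have hrn2 : r.toNat < area.length := by omega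
  have hWlen : (wall "O" ps area).length = area.length := length_wall _ _ _
  have hWrows : ∀ row ∈ wall "O" ps area, c.toNat < row.length := by
    intro row hrow
    obtain ⟨k, hk, hget⟩ := List.mem_iff_getElem.mp hrow
    have := rowlen_wall "O" ps area k
    rw [List.getElem?_eq_getElem hk, hget] at this
    have hk2 : k < area.length := by omega
    rw [List.getElem?_eq_getElem hk2] at this
    simp only [Option.map_some, Option.some_inj] at this
    have := hPre _ (List.getElem_mem hk2)
    omega
  have hArows : ∀ row ∈ area, c.toNat < row.length := by
    intro row hrow
    have := hPre _ hrow
    omega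
  have hW := cellG_cell9 (wall "O" ps area) r c hr0 (by omega) hc0 hWrows
  have hA := cellG_cell9 area r c hr0 hrn2 hc0 hArows
  rw [cell9_wall] at hW
  by_cases hmem : (r, c) ∈ ps
  · rw [if_pos hmem]
    rw [if_pos ⟨(r, c), hmem, rfl, rfl⟩, hA] at hW
    simpa using hW.symm
  · rw [if_neg hmem]
    have hno : ¬ ∃ q ∈ ps, q.1.toNat = r.toNat ∧ q.2.toNat = c.toNat := by
      rintro ⟨q, hqm, h1, h2⟩
      obtain ⟨hq1, _, hq2, _, _⟩ := hps q hqm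
      apply hmem
      have : q = (r, c) := by
        cases q; simp_all; omega
      exact this ▸ hqm
    rw [if_neg hno, hA] at hW
    simpa using hW.symm

theorem segRay_prefix (area : List (List String)) (n : Nat) (dr dc : Int) :
    ∀ (f : Nat) (r c : Int) (acc seg : List (Int × Int)),
      segRay area n dr dc f r c acc = some seg → ∀ q ∈ acc, q ∈ seg := by
  intro f
  induction f with
  | zero => intro r c acc seg h; cases h
  | succ f ih =>
    intro r c acc seg h q hq
    rw [segRay] at h
    split at h
    · split at h
      · cases h
      · split at h
        · cases h; exact hq
        · exact ih _ _ _ _ h q (by split <;> simp [hq])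
    · cases h

theorem ray_lemma (area : List (List String)) (ps : List (Int × Int))
    (hPre : Pre_solution area) (hps : GoodPos area ps) (dr dc : Int) :
    ∀ (f : Nat) (r c : Int) (acc : List (Int × Int)), (∀ q ∈ acc, q ∉ ps) →
      (walkA (wall "O" ps area) dr dc f r c = true ↔
        ∀ seg, segRay area area.length dr dc f r c acc = some seg → ∃ q ∈ seg, q ∈ ps) := by
  intro f
  induction f with
  | zero =>
    intro r c acc hacc
    simp [walkA, segRay]
  | succ f ih =>
    intro r c acc hacc
    rw [walkA, segRay, length_wall]
    by_cases hb : 0 ≤ r ∧ r < (area.length : Int) ∧ 0 ≤ c ∧ c < (area.length : Int)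
    · rw [if_pos hb, if_pos hb]
      obtain ⟨h1, h2, h3, h4⟩ := hb
      rw [cellG_wall area ps hPre hps r c h1 h2 h3 h4]
      by_cases hmem : (r, c) ∈ ps
      · rw [if_pos hmem]
        have hX : cellG area r c = "X" := (hps _ hmem).2.2.2.2
        simp only [if_pos rfl]
        constructor
        · intro _ seg hseg
          rw [hX] at hseg
          rw [if_neg (by decide), if_neg (by decide)] at hseg
          have : (r, c) ∈ seg := segRay_prefix area area.length dr dc f _ _ _ seg
            (by simpa using hseg) (r, c) (by simp)
          exact ⟨(r, c), this, hmem⟩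
        · intro _; rfl
      · rw [if_neg hmem]
        by_cases hO : cellG area r c = "O"
        · simp [hO]
        · rw [if_neg hO, if_neg hO]
          by_cases hS : cellG area r c = "S"
          · rw [if_pos hS, if_pos hS]
            simp only [Bool.false_eq_true, false_iff]
            intro hall
            obtain ⟨q, hqs, hqps⟩ := hall acc rfl
            exact hacc q hqs hqps
          · rw [if_neg hS, if_neg hS]
            apply ih
            intro q hq
            split at hq
            · rcases List.mem_append.mp hq with h | h
              · exact hacc q h
              · simpa using (by simpa using h : q = (r, c)) ▸ hmem
            · exact hacc q hq
    · rw [if_neg hb, if_neg hb]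
      simp

theorem mem_getValuePos (area : List (List String)) (v : String) (q : Int × Int) :
    q ∈ getValuePos area v ↔
      ∃ i j : Nat, i < area.length ∧ j < area.length ∧ cellG area i j = v ∧
        q = ((i : Int), (j : Int)) := by
  unfold getValuePos
  rw [List.mem_flatMap]
  constructor
  · rintro ⟨i, hi, hq⟩
    rw [List.mem_filterMap] at hq
    obtain ⟨j, hj, hq⟩ := hq
    rw [List.mem_range] at hi hj
    split at hq
    · exact ⟨i, j, hi, hj, by assumption, (Option.some_inj.mp hq).symm⟩
    · cases hq
  · rintro ⟨i, j, hi, hj, hv, rfl⟩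
    exact ⟨i, List.mem_range.mpr hi, List.mem_filterMap.mpr ⟨j, List.mem_range.mpr hj, by simp [hv]⟩⟩

theorem mem_combosPy {α : Type} (k : Nat) (xs ps : List α) (h : ps ∈ combosPy k xs) :
    ∀ q ∈ ps, q ∈ xs := by
  induction xs generalizing k ps with
  | nil =>
    cases k with
    | zero => simp [combosPy] at h; subst h; simp
    | succ k => simp [combosPy] at h
  | cons x rest ih =>
    cases k with
    | zero => simp [combosPy] at h; subst h; simp
    | succ k =>
      simp only [combosPy, List.mem_append, List.mem_map] at h
      rcases h with ⟨t, ht, rfl⟩ | h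
      · intro q hq
        rcases List.mem_cons.mp hq with rfl | hq2
        · exact List.mem_cons_self
        · exact List.mem_cons_of_mem _ (ih k t ht q hq2)
      · intro q hq; exact List.mem_cons_of_mem _ (ih (k + 1) ps h q hq)

theorem mem_segmentsB (area : List (List String)) (seg : List (Int × Int)) :
    seg ∈ segmentsB area ↔
      ∃ i j : Nat, i < area.length ∧ j < area.length ∧ cellG area (i : Int) (j : Int) = "T" ∧
        ∃ d ∈ dirsB, segRay area area.length d.1 d.2 (area.length + 1)
          ((i : Int) + d.1) ((j : Int) + d.2) [] = some seg := by
  unfold segmentsB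
  rw [List.mem_flatMap]
  constructor
  · rintro ⟨i, hi, h⟩
    rw [List.mem_flatMap] at h
    obtain ⟨j, hj, h⟩ := h
    rw [List.mem_range] at hi hj
    split at h
    · rw [List.mem_filterMap] at h
      obtain ⟨d, hd, hsr⟩ := h
      exact ⟨i, j, hi, hj, by assumption, d, hd, hsr⟩
    · cases h
  · rintro ⟨i, j, hi, hj, hT, d, hd, hsr⟩
    exact ⟨i, List.mem_range.mpr hi, List.mem_flatMap.mpr ⟨j, List.mem_range.mpr hj, by
      rw [if_pos hT]; exact List.mem_filterMap.mpr ⟨d, hd, hsr⟩⟩⟩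

theorem per_triple (area : List (List String)) (ps : List (Int × Int))
    (hPre : Pre_solution area) (hps : GoodPos area ps) :
    (checkA (wall "O" ps area) (getValuePos area "T") = true ↔
      ∀ seg ∈ segmentsB area, ∃ q ∈ seg, q ∈ ps) := by
  have hW : (wall "O" ps area).length = area.length := length_wall _ _ _
  rw [checkA, List.all_eq_true]
  constructor
  · intro hall seg hseg
    rw [mem_segmentsB] at hseg
    obtain ⟨i, j, hi, hj, hT, d, hd, hsr⟩ := hseg
    have hp : ((i : Int), (j : Int)) ∈ getValuePos area "T" :=
      (mem_getValuePos area "T" _).mpr ⟨i, j, hi, hj, hT, rfl⟩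
    have h4 := List.all_eq_true.mp (hall _ hp)
    fin_cases hd
    · have := h4 0 (by decide)
      simp only [rowOffset, columnOffset, List.getD] at this
      exact (ray_lemma area ps hPre hps _ _ _ _ _ [] (by simp)).mp (by simpa [hW] using this) seg hsr
    · have := h4 1 (by decide)
      simp only [rowOffset, columnOffset, List.getD] at this
      exact (ray_lemma area ps hPre hps _ _ _ _ _ [] (by simp)).mp (by simpa [hW] using this) seg hsr
    · have := h4 2 (by decide)
      simp only [rowOffset, columnOffset, List.getD] at this
      exact (ray_lemma area ps hPre hps _ _ _ _ _ [] (by simp)).mp (by simpa [hW] using this) seg hsr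
    · have := h4 3 (by decide)
      simp only [rowOffset, columnOffset, List.getD] at this
      exact (ray_lemma area ps hPre hps _ _ _ _ _ [] (by simp)).mp (by simpa [hW] using this) seg hsr
  · intro hall p hp
    rw [List.all_eq_true]
    intro k hk
    rw [mem_getValuePos] at hp
    obtain ⟨i, j, hi, hj, hT, rfl⟩ := hp
    rw [List.mem_range] at hk
    have hseg : ∀ d ∈ dirsB, ∀ seg,
        segRay area area.length d.1 d.2 (area.length + 1)
          ((i : Int) + d.1) ((j : Int) + d.2) [] = some seg →
        ∃ q ∈ seg, q ∈ ps := by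
      intro d hd seg hsr
      exact hall seg ((mem_segmentsB area seg).mpr ⟨i, j, hi, hj, hT, d, hd, hsr⟩)
    interval_cases k
    · simpa [rowOffset, columnOffset, List.getD, hW] using
        (ray_lemma area ps hPre hps (-1) 0 _ _ _ [] (by simp)).mpr (hseg (-1, 0) (by decide))
    · simpa [rowOffset, columnOffset, List.getD, hW] using
        (ray_lemma area ps hPre hps 1 0 _ _ _ [] (by simp)).mpr (hseg (1, 0) (by decide))
    · simpa [rowOffset, columnOffset, List.getD, hW] using
        (ray_lemma area ps hPre hps 0 (-1) _ _ _ [] (by simp)).mpr (hseg (0, -1) (by decide))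
    · simpa [rowOffset, columnOffset, List.getD, hW] using
        (ray_lemma area ps hPre hps 0 1 _ _ _ [] (by simp)).mpr (hseg (0, 1) (by decide))

theorem cell9_of_good (area : List (List String)) (ps : List (Int × Int))
    (hPre : Pre_solution area) (hps : GoodPos area ps) :
    ∀ q ∈ ps, cell9 area q.1.toNat q.2.toNat = some "X" := by
  intro q hq
  obtain ⟨h1, h2, h3, h4, h5⟩ := hps q hq
  rw [cellG_cell9 area q.1 q.2 h1 (by omega) h3
    (fun row hrow => by have := hPre row hrow; omega), h5]

theorem loopA_eq (area : List (List String)) (teachers : List (Int × Int))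
    (hPre : Pre_solution area) :
    ∀ L : List (List (Int × Int)), (∀ ps ∈ L, GoodPos area ps) →
      loopA teachers L area = L.any fun ps => checkA (wall "O" ps area) teachers := by
  intro L
  induction L with
  | nil => intro _; rfl
  | cons ps rest ih =>
    intro hL
    rw [loopA, List.any_cons]
    have hrest : loopA teachers rest (wall "X" ps (wall "O" ps area)) = loopA teachers rest area := by
      rw [restore area ps (cell9_of_good area ps hPre (hL ps (by simp)))]
    by_cases hc : checkA (wall "O" ps area) teachers
    · simp only [wall] at hc ⊢
      rw [if_pos hc, hc, Bool.true_or]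
    · simp only [wall] at hc hrest ⊢
      rw [if_neg hc, hrest, ih (fun p hp => hL p (by simp [hp]))]
      have hfalse : checkA (List.foldl (fun acc q => setCell acc q.1 q.2 "O") area ps) teachers
          = false := by simpa using hc
      rw [hfalse, Bool.false_or]
      rfl

theorem good_of_combos (area : List (List String)) (ps : List (Int × Int))
    (hps : ps ∈ combosPy 3 (getValuePos area "X")) : GoodPos area ps := by
  intro q hq
  have hmem := mem_combosPy 3 _ ps hps q hq
  rw [mem_getValuePos] at hmem
  obtain ⟨i, j, hi, hj, hX, rfl⟩ := hmem
  refine ⟨by simp, ?_, by simp, ?_, by simpa using hX⟩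
  · simpa using (by exact_mod_cast hi : (i : Int) < (area.length : Int))
  · simpa using (by exact_mod_cast hj : (j : Int) < (area.length : Int))

-- ===== VERDICT (by name: the statement is the Claim_ definition above) =====
theorem solution_spec : Claim_equal_solution := by
  intro area _ hPre
  unfold Spec_solution
  have hGood : ∀ ps ∈ combosPy 3 (getValuePos area "X"), GoodPos area ps :=
    fun ps hps => good_of_combos area ps hps
  have hA : solution area
      = loopA (getValuePos area "T") (combosPy 3 (getValuePos area "X")) area := rfl
  have hB : solution_alt area = (combosPy 3 (getValuePos area "X")).any fun t =>
      (segmentsB area).all fun seg => seg.any fun q =>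
        PySem.Set.contains (PySem.Set.ofList t) q := rfl
  rw [hA, hB, loopA_eq area _ hPre _ hGood, Bool.eq_iff_iff, List.any_eq_true, List.any_eq_true]
  constructor
  · rintro ⟨ps, hmem, hc⟩
    refine ⟨ps, hmem, ?_⟩
    rw [List.all_eq_true]
    intro seg hseg
    obtain ⟨q, hqs, hqp⟩ := (per_triple area ps hPre (hGood ps hmem)).mp hc seg hseg
    rw [List.any_eq_true]
    exact ⟨q, hqs, by rw [PySem.Set.contains_iff]; exact (PySem.Set.mem_ofList ps q).mpr hqp⟩
  · rintro ⟨ps, hmem, hall⟩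
    refine ⟨ps, hmem, ?_⟩
    rw [per_triple area ps hPre (hGood ps hmem)]
    intro seg hseg
    obtain ⟨q, hqs, hcont⟩ := List.any_eq_true.mp (List.all_eq_true.mp hall seg hseg)
    exact ⟨q, hqs, (PySem.Set.mem_ofList ps q).mp ((PySem.Set.contains_iff _ q).mp hcont)⟩
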